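-- pv_equiv track=rewrite | github.com/jontsui/Quiz-Generator | trig_quiz/trig.py | texify
-- ===== SOURCE A (Python) =====
-- def texify(input_string):
-- 	''' Converts specific substrings of given string into valid latex symbols.
-- 	Important!!! - This will probably break outside of the specific use cases
-- 	here (particularly replacement or parentheses with brackets) and does not
-- 	necessarily return fully valid latex code'''
-- 	d = {
-- 		'sin': '\\sin', 'cos': '\\cos', 'tan': '\\tan', 'csc': '\\csc', 'sec': '\\sec',
-- 		'cot': '\\cot', 'pi' : '\\pi', 'sqrt': '\\sqrt',  '(': '{', ')': '}'
-- 		}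
--
-- 	res = input_string
-- 	for key in d:
-- 		res = res.replace(key, d[key])
--
-- 	return res
-- ===== SOURCE B (Python) =====
-- def texify(input_string):
-- 	''' Converts specific substrings of given string into valid latex symbols.
-- 	Recursive descent over the substitution table; each substitution is done
-- 	by splitting on the key and joining the fragments with the replacement.'''
-- 	pairs = [
-- 		('sin', '\\sin'), ('cos', '\\cos'), ('tan', '\\tan'), ('csc', '\\csc'),
-- 		('sec', '\\sec'), ('cot', '\\cot'), ('pi', '\\pi'), ('sqrt', '\\sqrt'),
-- 		('(', '{'), (')', '}'),
-- 	]
--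
-- 	def go(s, table):
-- 		if not table:
-- 			return s
-- 		key, val = table[0]
-- 		return go(val.join(s.split(key)), table[1:])
--
-- 	return go(input_string, pairs)
-- ===== Notes on version B (the rewrite author's own statement) =====
-- stated objective: alternative
-- what changed: Replaces the imperative loop of ten full-string str.replace passes by a recursive descent over the substitution table in which each substitution is performed by splitting the string on the key and joining the fragment list with the replacement value.
import Mathlib
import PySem

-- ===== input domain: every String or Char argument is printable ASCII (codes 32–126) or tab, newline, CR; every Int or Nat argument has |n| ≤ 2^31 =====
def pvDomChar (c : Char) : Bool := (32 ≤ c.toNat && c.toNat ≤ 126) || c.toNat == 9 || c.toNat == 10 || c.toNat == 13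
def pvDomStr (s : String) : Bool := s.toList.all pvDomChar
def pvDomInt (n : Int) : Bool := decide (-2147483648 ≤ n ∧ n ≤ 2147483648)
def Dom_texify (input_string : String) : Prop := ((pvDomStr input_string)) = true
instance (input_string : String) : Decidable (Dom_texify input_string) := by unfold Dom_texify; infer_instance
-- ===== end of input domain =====

-- B replaces A's loop of ten full-string str.replace passes by a recursive descent over
-- the substitution table that performs each substitution via split-on-key + join-with-value
-- (objective: alternative decomposition, same cost; return values proved identical).


-- ===== PORT A =====
def texifyDict : PySem.Dict String String :=
  ((((((((((PySem.Dict.empty.insert "sin" "\\sin").insert "cos" "\\cos").insert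
    "tan" "\\tan").insert "csc" "\\csc").insert "sec" "\\sec").insert
    "cot" "\\cot").insert "pi" "\\pi").insert "sqrt" "\\sqrt").insert
    "(" "{").insert ")" "}")

def texify (input_string : String) : String :=
  texifyDict.keys.foldl
    (fun res key => PySem.Str.replace res key ((texifyDict.get? key).getD ""))
    input_string

-- ===== PORT B =====
-- the recursive go of Source B: descend the table, split on the key, join with the value
def texify_altGo : String → List (String × String) → String
  | s, [] => s
  | s, (key, val) :: rest =>
      texify_altGo (PySem.Str.join val ((PySem.Str.split? s key).getD [])) rest

def texify_alt (input_string : String) : String :=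
  texify_altGo input_string
    [("sin", "\\sin"), ("cos", "\\cos"), ("tan", "\\tan"), ("csc", "\\csc"),
     ("sec", "\\sec"), ("cot", "\\cot"), ("pi", "\\pi"), ("sqrt", "\\sqrt"),
     ("(", "{"), (")", "}")]

-- ===== PRECONDITION & SPEC =====
def Spec_texify (input_string : String) (out : String) : Prop := out = texify_alt input_string
instance (input_string : String) (out : String) : Decidable (Spec_texify input_string out) := by
  unfold Spec_texify; infer_instance

-- ===== CLAIM (what is proved, stated in full; the proofs are below) =====
def Claim_equal_texify : Prop :=
  ∀ (input_string : String), Dom_texify input_string →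
    Spec_texify input_string (texify input_string)

-- ===== LEMMAS AND PROOFS =====

-- spec-level recursion equal to PySem.Chars.replace (for a nonempty pattern)
def rep (k v : List Char) : List Char → List Char
  | [] => []
  | c :: t =>
    if k.isPrefixOf (c :: t) then v ++ rep k v (List.drop (k.length - 1) t)
    else c :: rep k v t
termination_by l => l.length
decreasing_by all_goals (simp only [List.length_drop, List.length_cons]; omega)

theorem rep_nil (k v : List Char) : rep k v [] = [] := by rw [rep.eq_def]

theorem rep_cons (k v : List Char) (c : Char) (t : List Char) :
    rep k v (c :: t) =
      if k.isPrefixOf (c :: t) then v ++ rep k v (List.drop (k.length - 1) t)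
      else c :: rep k v t := by
  rw [rep.eq_def]

theorem rep_cons_neg (k v : List Char) (c : Char) (t : List Char)
    (h : ¬ k.isPrefixOf (c :: t)) : rep k v (c :: t) = c :: rep k v t := by
  rw [rep_cons]; simp [h]

theorem goLemma (k v : List Char) (hk : k ≠ []) :
    ∀ (fuel : Nat) (l acc : List Char), l.length ≤ fuel →
      PySem.Chars.replace.go k v fuel l acc = acc.reverse ++ rep k v l := by
  intro fuel
  induction fuel with
  | zero =>
    intro l acc hl
    have : l = [] := List.eq_nil_of_length_eq_zero (Nat.le_zero.mp hl)
    subst this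
    simp [PySem.Chars.replace.go.eq_def, rep_nil]
  | succ n ih =>
    intro l acc hl
    cases l with
    | nil =>
      simp [PySem.Chars.replace.go.eq_def, rep_nil]
    | cons c t =>
      have hkl : 1 ≤ k.length := by
        cases k with
        | nil => exact absurd rfl hk
        | cons _ _ => simp
      rw [PySem.Chars.replace.go.eq_def]
      by_cases h : k.isPrefixOf (c :: t)
      · simp only [h, if_pos]
        have hdrop : List.drop k.length (c :: t) = List.drop (k.length - 1) t := by
          cases k with
          | nil => exact absurd rfl hk
          | cons d k' => simp
        have hlen2 : (List.drop (k.length - 1) t).length ≤ n := by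
          simp only [List.length_cons] at hl
          simp only [List.length_drop]
          omega
        rw [hdrop, ih _ _ hlen2, rep_cons, if_pos h]
        simp
      · simp only [h, Bool.false_eq_true]
        have hlen2 : t.length ≤ n := by
          simp only [List.length_cons] at hl; omega
        rw [ih _ _ hlen2, rep_cons_neg k v c t h]
        simp

theorem replace_eq_rep (s k v : List Char) (hk : k ≠ []) :
    PySem.Chars.replace s k v = rep k v s := by
  rw [PySem.Chars.replace]
  have : k.isEmpty = false := by cases k with
    | nil => exact absurd rfl hk
    | cons _ _ => rfl
  simp only [this, Bool.false_eq_true, if_neg, not_false_eq_true]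
  simpa using goLemma k v hk s.length s [] (le_refl _)

-- generic distribution of rep over an occurrence-free front segment
-- list-level pair table shared by the two bridging proofs (proof-side only)
def texifyPairs : List (List Char × List Char) :=
  [ (['s','i','n'], ['\\','s','i','n']), (['c','o','s'], ['\\','c','o','s']),
    (['t','a','n'], ['\\','t','a','n']), (['c','s','c'], ['\\','c','s','c']),
    (['s','e','c'], ['\\','s','e','c']), (['c','o','t'], ['\\','c','o','t']),
    (['p','i'], ['\\','p','i']), (['s','q','r','t'], ['\\','s','q','r','t']),
    (['('], ['{']), ([')'], ['}']) ]

def frep (ps : List (List Char × List Char)) (l : List Char) : List Char :=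
  ps.foldl (fun res q => rep q.1 q.2 res) l

theorem toList_ofList (l : List Char) : (String.ofList l).toList = l := by simp

-- spec-level recursion equal to PySem.Chars.splitOn (for a nonempty separator)
def spl (k : List Char) : List Char → List (List Char)
  | [] => [[]]
  | c :: t =>
    if k.isPrefixOf (c :: t) then [] :: spl k (List.drop (k.length - 1) t)
    else (spl k t).modifyHead (fun h => c :: h)
termination_by l => l.length
decreasing_by all_goals (simp only [List.length_drop, List.length_cons]; omega)

theorem spl_nil (k : List Char) : spl k [] = [[]] := by rw [spl.eq_def]

theorem spl_cons (k : List Char) (c : Char) (t : List Char) :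
    spl k (c :: t) =
      if k.isPrefixOf (c :: t) then [] :: spl k (List.drop (k.length - 1) t)
      else (spl k t).modifyHead (fun h => c :: h) := by
  rw [spl.eq_def]

theorem spl_ne_nil (k : List Char) : ∀ l, spl k l ≠ [] := by
  intro l
  induction l with
  | nil => rw [spl_nil]; simp
  | cons c t ih =>
    rw [spl_cons]
    by_cases h : k.isPrefixOf (c :: t)
    · simp [h]
    · simp only [h, Bool.false_eq_true, if_false]
      cases hs : spl k t with
      | nil => exact absurd hs ih
      | cons a as => simp

theorem goSplitLemma (k : List Char) (hk : k ≠ []) :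
    ∀ (fuel : Nat) (l cur : List Char) (acc : List (List Char)), l.length ≤ fuel →
      PySem.Chars.splitOn.go k fuel l cur acc =
        acc.reverse ++ (spl k l).modifyHead (fun h => cur.reverse ++ h) := by
  intro fuel
  induction fuel with
  | zero =>
    intro l cur acc hl
    have : l = [] := List.eq_nil_of_length_eq_zero (Nat.le_zero.mp hl)
    subst this
    rw [PySem.Chars.splitOn.go.eq_def, spl_nil]
    simp
  | succ n ih =>
    intro l cur acc hl
    cases l with
    | nil =>
      rw [PySem.Chars.splitOn.go.eq_def, spl_nil]
      simp
    | cons c t =>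
      rw [PySem.Chars.splitOn.go.eq_def]
      by_cases h : k.isPrefixOf (c :: t)
      · simp only [h, if_pos]
        have hdrop : List.drop k.length (c :: t) = List.drop (k.length - 1) t := by
          cases k with
          | nil => exact absurd rfl hk
          | cons d k' => simp
        have hlen2 : (List.drop (k.length - 1) t).length ≤ n := by
          simp only [List.length_cons] at hl
          simp only [List.length_drop]
          omega
        rw [hdrop, ih _ _ _ hlen2, spl_cons, if_pos h]
        cases hs : spl k (List.drop (k.length - 1) t) with
        | nil => exact absurd hs (spl_ne_nil k _)
        | cons a as => simp [List.modifyHead]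
      · simp only [h, Bool.false_eq_true, if_false]
        have hlen2 : t.length ≤ n := by
          simp only [List.length_cons] at hl; omega
        rw [ih _ _ _ hlen2, spl_cons]
        simp only [h, Bool.false_eq_true, if_false]
        cases hs : spl k t with
        | nil => exact absurd hs (spl_ne_nil k t)
        | cons a as => simp

theorem splitOn_eq_spl (s k : List Char) (hk : k ≠ []) :
    PySem.Chars.splitOn s k = spl k s := by
  rw [PySem.Chars.splitOn, goSplitLemma k hk (s.length + 1) s [] [] (by omega)]
  cases hs : spl k s with
  | nil => exact absurd hs (spl_ne_nil k s)
  | cons a as => simp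

theorem intercalate_cons₂ (v x a : List Char) (as : List (List Char)) :
    v.intercalate (x :: a :: as) = x ++ v ++ v.intercalate (a :: as) := by
  simp [List.intercalate]

-- joining the fragments with the value rebuilds exactly the replace result
theorem join_spl (k v : List Char) :
    ∀ (n : Nat) (l : List Char), l.length ≤ n →
      v.intercalate (spl k l) = rep k v l := by
  intro n
  induction n with
  | zero =>
    intro l hl
    have : l = [] := List.eq_nil_of_length_eq_zero (Nat.le_zero.mp hl)
    subst this
    rw [spl_nil, rep_nil]
    simp [List.intercalate]
  | succ m ih =>
    intro l hl
    cases l with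
    | nil =>
      rw [spl_nil, rep_nil]
      simp [List.intercalate]
    | cons c t =>
      rw [spl_cons]
      by_cases h : k.isPrefixOf (c :: t)
      · rw [if_pos h]
        have hlen2 : (List.drop (k.length - 1) t).length ≤ m := by
          simp only [List.length_cons] at hl
          simp only [List.length_drop]
          omega
        have hrec := ih _ hlen2
        cases hs : spl k (List.drop (k.length - 1) t) with
        | nil => exact absurd hs (spl_ne_nil k _)
        | cons a as =>
          rw [hs] at hrec
          rw [rep_cons, if_pos h, ← hrec, intercalate_cons₂]
          simp
      · rw [if_neg (by simpa using h)]
        have hlen2 : t.length ≤ m := by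
          simp only [List.length_cons] at hl; omega
        have hrec := ih _ hlen2
        cases hs : spl k t with
        | nil => exact absurd hs (spl_ne_nil k t)
        | cons a as =>
          rw [hs] at hrec
          rw [rep_cons_neg k v c t h, ← hrec]
          cases as with
          | nil => simp [List.intercalate, List.modifyHead]
          | cons b bs =>
            rw [List.modifyHead, intercalate_cons₂, intercalate_cons₂]
            simp

-- one Source B step at string level
theorem stepB (x k v : String) (hk : k.toList ≠ []) :
    PySem.Str.join v ((PySem.Str.split? x k).getD []) =
      String.ofList (rep k.toList v.toList x.toList) := by
  have hkE : k.toList.isEmpty = false := by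
    cases h : k.toList with
    | nil => exact absurd h hk
    | cons _ _ => rfl
  rw [PySem.Str.split?, PySem.Chars.split?, if_neg (by simp [hkE]), Option.map_some]
  rw [Option.getD_some, PySem.Str.join, PySem.Chars.join]
  congr 1
  rw [List.map_map]
  simp [Function.comp_def]
  rw [splitOn_eq_spl _ _ hk, join_spl k.toList v.toList x.toList.length _ (le_refl _)]

theorem str_replace_eq (x k v : String) (hk : k.toList ≠ []) :
    PySem.Str.replace x k v = String.ofList (rep k.toList v.toList x.toList) := by
  rw [PySem.Str.replace, replace_eq_rep _ _ _ hk]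

theorem texify_eq (s : String) :
    texify s = String.ofList (frep texifyPairs s.toList) := by
  have hkeys : texifyDict.keys = ["sin","cos","tan","csc","sec","cot","pi","sqrt","(",")"] := by
    decide
  have hget : ∀ key ∈ texifyDict.keys, True := fun _ _ => trivial
  rw [texify, hkeys]
  simp only [List.foldl_cons, List.foldl_nil]
  rw [str_replace_eq _ "sin" _ (by decide), str_replace_eq _ "cos" _ (by decide),
    str_replace_eq _ "tan" _ (by decide), str_replace_eq _ "csc" _ (by decide),
    str_replace_eq _ "sec" _ (by decide), str_replace_eq _ "cot" _ (by decide),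
    str_replace_eq _ "pi" _ (by decide), str_replace_eq _ "sqrt" _ (by decide),
    str_replace_eq _ "(" _ (by decide), str_replace_eq _ ")" _ (by decide)]
  simp only [toList_ofList]
  rfl

theorem texify_alt_eq (s : String) :
    texify_alt s = String.ofList (frep texifyPairs s.toList) := by
  rw [texify_alt]
  simp only [texify_altGo]
  rw [stepB _ "sin" _ (by decide), stepB _ "cos" _ (by decide),
    stepB _ "tan" _ (by decide), stepB _ "csc" _ (by decide),
    stepB _ "sec" _ (by decide), stepB _ "cot" _ (by decide),
    stepB _ "pi" _ (by decide), stepB _ "sqrt" _ (by decide),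
    stepB _ "(" _ (by decide), stepB _ ")" _ (by decide)]
  simp only [toList_ofList]
  rfl

-- ===== VERDICT (by name: the statement is the Claim_ definition above) =====
theorem texify_spec : Claim_equal_texify := by
  intro s hdom
  unfold Spec_texify
  rw [texify_eq, texify_alt_eq]
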